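-- pv_equiv track=rewrite | github.com/pypi-data/pypi-mirror-386 | packages/alpacloud.promls/alpacloud.promls-0.1.0-py3-none-any.whl/alpacloud/promls/filter.py | letter_mismatch
-- ===== SOURCE A (Python) =====
-- def letter_mismatch(s, q):
-- 	"""Quickly eliminate metrics that will never match."""
--
-- 	def letter_dict(v: str) -> dict[str, int]:
-- 		d = {}
-- 		for c in v:
-- 			d[c] = d.get(c, 0) + 1
-- 		return d
--
-- 	s = letter_dict(s)
-- 	q = letter_dict(q)
--
-- 	misses = 0
-- 	for k, v in q.items():
-- 		delta = v - s.get(k, 0)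
-- 		if delta > 0:
-- 			misses += abs(delta)
--
-- 	return misses
-- ===== SOURCE B (Python) =====
-- def letter_mismatch(s, q):
-- 	"""Quickly eliminate metrics that will never match."""
-- 	pool = list(s)
-- 	misses = 0
-- 	for c in q:
-- 		if c in pool:
-- 			pool.remove(c)
-- 		else:
-- 			misses += 1
-- 	return misses
-- ===== Notes on version B (the rewrite author's own statement) =====
-- stated objective: alternative
-- what changed: Replaces A's two frequency dicts and a lookup-joined summing loop with a greedy multiset matching: each char of q removes one matching char from a mutable pool copied from s, counting the chars that find no match.
import Mathlib
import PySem

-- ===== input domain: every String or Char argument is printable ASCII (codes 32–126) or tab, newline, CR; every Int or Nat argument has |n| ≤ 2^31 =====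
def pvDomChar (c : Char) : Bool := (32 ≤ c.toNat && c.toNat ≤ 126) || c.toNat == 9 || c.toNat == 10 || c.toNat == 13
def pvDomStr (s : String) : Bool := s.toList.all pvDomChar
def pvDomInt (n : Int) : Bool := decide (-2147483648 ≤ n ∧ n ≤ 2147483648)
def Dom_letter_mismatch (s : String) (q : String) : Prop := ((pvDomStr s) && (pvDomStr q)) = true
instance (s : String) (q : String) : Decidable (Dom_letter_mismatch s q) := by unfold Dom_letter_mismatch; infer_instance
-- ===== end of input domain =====

-- B replaces A's two frequency dicts joined by a summing lookup loop with greedy multiset matching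
-- against a mutable pool copied from s (alternative algorithm, no dicts; O(|s|*|q|) instead of linear).

-- ===== PORT A =====
-- A's nested helper letter_dict: d[c] = d.get(c, 0) + 1 over the string
def letterDict (v : List Char) : PySem.Dict Char Int :=
  v.foldl (fun d c => d.insert c (d.getD c 0 + 1)) PySem.Dict.empty

def letter_mismatch (s : String) (q : String) : Int :=
  let sD := letterDict s.toList
  let qD := letterDict q.toList
  qD.items.foldl (fun misses p =>
    let delta := p.2 - sD.getD p.1 0
    if 0 < delta then misses + |delta| else misses) 0

-- ===== PORT B =====
-- pool = list(s); for c in q: if c in pool: pool.remove(c) else: misses += 1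
-- (list.remove of a present element = List.erase, removal of the first occurrence)
def letter_mismatch_alt (s : String) (q : String) : Int :=
  (q.toList.foldl
    (fun (st : List Char × Int) c =>
      if c ∈ st.1 then (st.1.erase c, st.2) else (st.1, st.2 + 1))
    (s.toList, 0)).2

-- ===== PRECONDITION & SPEC =====
def Spec_letter_mismatch (s : String) (q : String) (out : Int) : Prop := out = letter_mismatch_alt s q
instance (s : String) (q : String) (out : Int) : Decidable (Spec_letter_mismatch s q out) := by unfold Spec_letter_mismatch; infer_instance

-- ===== CLAIM (what is proved, stated in full; the proofs are below) =====
def Claim_equal_letter_mismatch : Prop := ∀ (s : String) (q : String), Dom_letter_mismatch s q → Spec_letter_mismatch s q (letter_mismatch s q)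

-- ===== LEMMAS AND PROOFS =====

-- A's final loop as a sum of positive parts over the items list
lemma fold_misses (l : List (Char × Int)) (g : Char → Int) (m : Int) :
    l.foldl (fun misses p =>
        if 0 < p.2 - g p.1 then misses + |p.2 - g p.1| else misses) m
      = m + (l.map (fun p => max (p.2 - g p.1) 0)).sum := by
  induction l generalizing m with
  | nil => simp
  | cons p ps ih =>
    simp only [List.foldl_cons, List.map_cons, List.sum_cons]
    by_cases h : 0 < p.2 - g p.1
    · rw [if_pos h, ih, abs_of_pos h, max_eq_left h.le]; ring
    · rw [if_neg h, ih, max_eq_right (le_of_not_gt h)]; ring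

-- sum over the distinct elements of l, as a Finset sum
lemma set_map_sum_eq_finset_sum (l : List Char) (f : Char → Int) :
    ((PySem.Set.ofList l).map f).sum = ∑ k ∈ l.toFinset, f k := by
  have hnd : (PySem.Set.ofList l).Nodup := PySem.Set.nodup_ofList l
  have hfs : (PySem.Set.ofList l).toFinset = l.toFinset := by
    apply Finset.ext
    intro x
    simp [PySem.Set.mem_ofList]
  rw [← hfs, List.sum_toFinset f hnd]

-- the common value: A reduces to this sum of positive surpluses
lemma A_as_sum (s q : String) :
    letter_mismatch s q
      = ∑ k ∈ q.toList.toFinset, max ((q.toList.count k : Int) - (s.toList.count k : Int)) 0 := by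
  unfold letter_mismatch letterDict
  dsimp only
  rw [PySem.Dict.foldl_insert_getD_add_one_eq_counter,
      PySem.Dict.foldl_insert_getD_add_one_eq_counter,
      fold_misses _ (fun k => (PySem.Dict.counter s.toList).getD k 0) 0,
      PySem.Dict.items_counter, List.map_map, zero_add]
  have : ((fun p : Char × Int => max (p.2 - (PySem.Dict.counter s.toList).getD p.1 0) 0) ∘
      fun k => (k, (q.toList.count k : Int)))
      = fun k => max ((q.toList.count k : Int) - (s.toList.count k : Int)) 0 := by
    funext k
    simp [PySem.Dict.getD_counter]
  rw [this, set_map_sum_eq_finset_sum]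

-- B's greedy loop, for an arbitrary pool and accumulator
lemma greedy_eq (q : List Char) : ∀ (pool : List Char) (m : Int),
    (q.foldl
      (fun (st : List Char × Int) c =>
        if c ∈ st.1 then (st.1.erase c, st.2) else (st.1, st.2 + 1))
      (pool, m)).2
      = m + ∑ k ∈ q.toFinset, max ((q.count k : Int) - (pool.count k : Int)) 0 := by
  induction q with
  | nil => intro pool m; simp
  | cons c rest ih =>
    intro pool m
    simp only [List.foldl_cons]
    by_cases hc : c ∈ pool
    · rw [if_pos hc, ih]
      have hpc : 1 ≤ pool.count c := List.one_le_count_iff.mpr hc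
      by_cases hcr : c ∈ rest
      · have hfs : (c :: rest).toFinset = rest.toFinset := by
          simp [List.toFinset_cons, Finset.insert_eq_self.mpr (List.mem_toFinset.mpr hcr)]
        rw [hfs]
        congr 1
        apply Finset.sum_congr rfl
        intro k hk
        by_cases hkc : k = c
        · subst hkc
          congr 1
          rw [List.count_erase_self, List.count_cons_self]
          push_cast [hpc]
          ring
        · rw [List.count_erase_of_ne hkc]
          simp [Ne.symm hkc]
      · have hfs : (c :: rest).toFinset = insert c rest.toFinset := List.toFinset_cons
        rw [hfs, Finset.sum_insert (by simpa using hcr)]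
        have h0 : rest.count c = 0 := List.count_eq_zero.mpr hcr
        have hterm : max (((c :: rest).count c : Int) - (pool.count c : Int)) 0 = 0 := by
          rw [List.count_cons_self, h0]
          apply max_eq_right
          push_cast
          omega
        rw [hterm, zero_add]
        congr 1
        apply Finset.sum_congr rfl
        intro k hk
        have hkc : k ≠ c := by
          intro h; subst h; exact hcr (List.mem_toFinset.mp hk)
        rw [List.count_erase_of_ne hkc]
        simp [Ne.symm hkc]
    · rw [if_neg hc, ih]
      have h0 : pool.count c = 0 := List.count_eq_zero.mpr hc
      by_cases hcr : c ∈ rest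
      · have hfs : (c :: rest).toFinset = rest.toFinset := by
          simp [List.toFinset_cons, Finset.insert_eq_self.mpr (List.mem_toFinset.mpr hcr)]
        rw [hfs]
        have hcF : c ∈ rest.toFinset := List.mem_toFinset.mpr hcr
        rw [← Finset.sum_erase_add rest.toFinset _ hcF,
            ← Finset.sum_erase_add rest.toFinset
              (fun k => max (((c :: rest).count k : Int) - (pool.count k : Int)) 0) hcF]
        have hsum : ∑ k ∈ rest.toFinset.erase c, max ((rest.count k : Int) - (pool.count k : Int)) 0
            = ∑ k ∈ rest.toFinset.erase c, max (((c :: rest).count k : Int) - (pool.count k : Int)) 0 := by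
          apply Finset.sum_congr rfl
          intro k hk
          simp [Ne.symm (Finset.ne_of_mem_erase hk)]
        rw [hsum]
        have ht1 : max ((rest.count c : Int) - (pool.count c : Int)) 0 = (rest.count c : Int) := by
          rw [h0]; simp
        have ht2 : max (((c :: rest).count c : Int) - (pool.count c : Int)) 0
            = (rest.count c : Int) + 1 := by
          rw [h0, List.count_cons_self]
          push_cast
          rw [sub_zero]
          apply max_eq_left
          positivity
        rw [ht1, ht2]
        ring
      · have hfs : (c :: rest).toFinset = insert c rest.toFinset := List.toFinset_cons
        rw [hfs, Finset.sum_insert (by simpa using hcr)]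
        have hterm : max (((c :: rest).count c : Int) - (pool.count c : Int)) 0 = 1 := by
          rw [List.count_cons_self, List.count_eq_zero.mpr hcr, h0]
          simp
        rw [hterm]
        have hsum : ∑ k ∈ rest.toFinset, max ((rest.count k : Int) - (pool.count k : Int)) 0
            = ∑ k ∈ rest.toFinset, max (((c :: rest).count k : Int) - (pool.count k : Int)) 0 := by
          apply Finset.sum_congr rfl
          intro k hk
          have hkc : k ≠ c := by
            intro h; subst h; exact hcr (List.mem_toFinset.mp hk)
          simp [Ne.symm hkc]
        rw [hsum]
        ring

-- ===== VERDICT (by name: the statement is the Claim_ definition above) =====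
theorem letter_mismatch_spec : Claim_equal_letter_mismatch := by
  intro s q _
  unfold Spec_letter_mismatch letter_mismatch_alt
  rw [A_as_sum, greedy_eq, zero_add]
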